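-- pv_equiv track=rewrite | github.com/Muthukumar-datasirpi/DSAI | test_api.py | intent_to_methods
-- ===== SOURCE A (Python) =====
-- from typing import Dict, Any, List
--
-- def intent_to_methods(user_text: str) -> List[str]:
--     t = user_text.lower()
--     if any(k in t for k in ["create", "add", "open", "log", "new", "raise"]):
--         return ["POST", "PUT"]
--     if any(k in t for k in ["update", "edit", "change", "modify", "move", "set"]):
--         return ["PUT", "PATCH", "POST"]
--     if any(k in t for k in ["delete", "remove", "drop"]):
--         return ["DELETE"]
--     if any(k in t for k in ["get", "fetch", "read", "list", "show", "find", "search", "view"]):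
--         return ["GET"]
--     return ["POST", "PUT", "PATCH", "DELETE", "GET"]
-- ===== SOURCE B (Python) =====
-- # B: position-driven matcher: scan the text left-to-right once; at each position check
-- # which keywords start there and keep the best (lowest) priority group; index a table.
-- _TABLES = [
--     ["POST", "PUT"],
--     ["PUT", "PATCH", "POST"],
--     ["DELETE"],
--     ["GET"],
--     ["POST", "PUT", "PATCH", "DELETE", "GET"],
-- ]
-- _KEYWORDS = [
--     ("create", 0), ("add", 0), ("open", 0), ("log", 0), ("new", 0), ("raise", 0),
--     ("update", 1), ("edit", 1), ("change", 1), ("modify", 1), ("move", 1), ("set", 1),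
--     ("delete", 2), ("remove", 2), ("drop", 2),
--     ("get", 3), ("fetch", 3), ("read", 3), ("list", 3), ("show", 3),
--     ("find", 3), ("search", 3), ("view", 3),
-- ]
--
-- def intent_to_methods(user_text: str):
--     t = user_text.lower()
--     best = 4
--     for i in range(len(t)):
--         for kw, g in _KEYWORDS:
--             if g < best and t.startswith(kw, i):
--                 best = g
--     return list(_TABLES[best])
-- ===== Notes on version B (the rewrite author's own statement) =====
-- stated objective: alternative
-- what changed: Replaced the keyword-driven chain of substring membership tests by a text-driven single left-to-right scan: at each text position it checks which keywords start there and keeps the minimal priority group index, then indexes a methods table (trades some constant-factor speed for the inverted traversal).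
import Mathlib
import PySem

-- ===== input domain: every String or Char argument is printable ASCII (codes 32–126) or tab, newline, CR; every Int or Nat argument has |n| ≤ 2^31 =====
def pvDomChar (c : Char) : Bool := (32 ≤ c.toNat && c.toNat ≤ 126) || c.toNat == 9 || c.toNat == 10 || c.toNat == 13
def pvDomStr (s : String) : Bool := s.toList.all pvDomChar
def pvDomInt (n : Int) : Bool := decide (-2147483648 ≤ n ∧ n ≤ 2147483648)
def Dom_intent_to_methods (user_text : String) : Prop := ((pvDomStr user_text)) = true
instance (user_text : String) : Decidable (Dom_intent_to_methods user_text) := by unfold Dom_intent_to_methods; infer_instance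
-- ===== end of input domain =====

-- B replaces A's keyword-driven chain of `kw in text` tests by a text-driven single
-- left-to-right position scan tracking the minimal matching priority group, then a table
-- lookup; objective: alternative (same cost, different traversal).

-- ===== PORT A =====
def intent_to_methods (user_text : String) : List String :=
  let t := PySem.Str.lower user_text
  if ["create", "add", "open", "log", "new", "raise"].any (fun k => PySem.Str.isIn k t) then
    ["POST", "PUT"]
  else if ["update", "edit", "change", "modify", "move", "set"].any (fun k => PySem.Str.isIn k t) then
    ["PUT", "PATCH", "POST"]
  else if ["delete", "remove", "drop"].any (fun k => PySem.Str.isIn k t) then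
    ["DELETE"]
  else if ["get", "fetch", "read", "list", "show", "find", "search", "view"].any (fun k => PySem.Str.isIn k t) then
    ["GET"]
  else
    ["POST", "PUT", "PATCH", "DELETE", "GET"]

-- ===== PORT B =====
def pvTables : List (List String) :=
  [["POST", "PUT"], ["PUT", "PATCH", "POST"], ["DELETE"], ["GET"],
   ["POST", "PUT", "PATCH", "DELETE", "GET"]]

def pvKeywords : List (List Char × Nat) :=
  [("create".toList, 0), ("add".toList, 0), ("open".toList, 0), ("log".toList, 0),
   ("new".toList, 0), ("raise".toList, 0),
   ("update".toList, 1), ("edit".toList, 1), ("change".toList, 1), ("modify".toList, 1),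
   ("move".toList, 1), ("set".toList, 1),
   ("delete".toList, 2), ("remove".toList, 2), ("drop".toList, 2),
   ("get".toList, 3), ("fetch".toList, 3), ("read".toList, 3), ("list".toList, 3),
   ("show".toList, 3), ("find".toList, 3), ("search".toList, 3), ("view".toList, 3)]

-- inner loop: `for kw, g in _KEYWORDS: if g < best and t.startswith(kw, i): best = g`
-- (t.startswith(kw, i) with 0 ≤ i is exactly `kw <+: t.drop i`, i.e. Chars.startswith (t.drop i) kw)
def pvInner (s : List Char) (b : Nat) : List (List Char × Nat) → Nat
  | [] => b
  | (kw, g) :: rest => pvInner s (if decide (g < b) && PySem.Chars.startswith s kw then g else b) rest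

def intent_to_methods_alt (user_text : String) : List String :=
  let t := (PySem.Str.lower user_text).toList
  let best := (List.range t.length).foldl (fun b i => pvInner (t.drop i) b pvKeywords) 4
  pvTables.getD best []   -- best is always ≤ 4, so this is exactly _TABLES[best]

-- ===== PRECONDITION & SPEC =====
def Spec_intent_to_methods (user_text : String) (out : List String) : Prop := out = intent_to_methods_alt user_text
instance (user_text : String) (out : List String) : Decidable (Spec_intent_to_methods user_text out) := by unfold Spec_intent_to_methods; infer_instance

-- ===== CLAIM (what is proved, stated in full; the proofs are below) =====
def Claim_equal_intent_to_methods : Prop := ∀ (user_text : String), Dom_intent_to_methods user_text → Spec_intent_to_methods user_text (intent_to_methods user_text)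

-- ===== LEMMAS AND PROOFS =====

-- the matching group indices contributed at one position
def pvGs (s : List Char) : List Nat :=
  (pvKeywords.filter (fun p => PySem.Chars.startswith s p.1)).map Prod.snd

theorem pvKeywords_fst_ne_nil : ∀ p ∈ pvKeywords, p.1 ≠ [] := by decide

theorem pvKeywords_snd_lt : ∀ p ∈ pvKeywords, p.2 < 4 := by decide

theorem pvInner_eq_foldl (s : List Char) (rules : List (List Char × Nat)) (b : Nat) :
    pvInner s b rules
      = ((rules.filter (fun p => PySem.Chars.startswith s p.1)).map Prod.snd).foldl min b := by
  induction rules generalizing b with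
  | nil => rfl
  | cons p rest ih =>
    obtain ⟨kw, g⟩ := p
    by_cases h : PySem.Chars.startswith s kw = true
    · have hupd : (if (decide (g < b) && PySem.Chars.startswith s kw) = true then g else b)
          = min b g := by
        simp only [h, Bool.and_true, decide_eq_true_eq]
        split_ifs <;> omega
      simp only [pvInner, hupd, List.filter_cons]
      simp only [h, if_true, List.map_cons, List.foldl_cons]
      exact ih (min b g)
    · have hb : PySem.Chars.startswith s kw = false := by
        simpa using h
      simp only [pvInner, hb, Bool.and_false, Bool.false_eq_true, if_false, List.filter_cons]
      exact ih b

theorem foldl_min_flatMap (f : Nat → List Nat) (l : List Nat) (b : Nat) :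
    l.foldl (fun acc i => (f i).foldl min acc) b = (l.flatMap f).foldl min b := by
  induction l generalizing b with
  | nil => rfl
  | cons i rest ih => simp [List.flatMap_cons, List.foldl_append, ih]

theorem foldl_min_mem (l : List Nat) (b : Nat) : l.foldl min b ∈ b :: l := by
  induction l generalizing b with
  | nil => simp
  | cons g rest ih =>
    simp only [List.foldl_cons]
    rcases List.mem_cons.mp (ih (min b g)) with h | h
    · rw [h]
      by_cases hbg : b ≤ g
      · simp [Nat.min_eq_left hbg]
      · simp [Nat.min_eq_right (by omega : g ≤ b)]
    · simp [h]

theorem foldl_min_le_init (l : List Nat) (b : Nat) : l.foldl min b ≤ b := by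
  induction l generalizing b with
  | nil => simp
  | cons g rest ih => exact le_trans (ih (min b g)) (Nat.min_le_left b g)

theorem foldl_min_le_mem (l : List Nat) (g : Nat) (hg : g ∈ l) : ∀ b, l.foldl min b ≤ g := by
  induction l with
  | nil => simp at hg
  | cons x rest ih =>
    intro b
    rcases List.mem_cons.mp hg with rfl | h'
    · exact le_trans (foldl_min_le_init rest (min b g)) (Nat.min_le_right b g)
    · exact ih h' (min b x)

-- `kw in s` (isIn) ↔ kw starts at some position i < |s|, for nonempty kw
theorem isIn_iff_exists_startswith (kw s : List Char) (hkw : kw ≠ []) :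
    PySem.Chars.isIn kw s = true
      ↔ ∃ i, i ∈ List.range s.length ∧ PySem.Chars.startswith (s.drop i) kw = true := by
  constructor
  · intro h
    obtain ⟨j, hj⟩ := (PySem.Chars.exists_prefix_drop_iff_isIn kw s).mpr h
    have hjlt : j < s.length := by
      by_contra hge
      have hnil : s.drop j = [] := List.drop_eq_nil_of_le (by omega)
      rw [hnil] at hj
      exact hkw (List.prefix_nil.mp hj)
    exact ⟨j, List.mem_range.mpr hjlt, (PySem.Chars.startswith_iff _ _).mpr hj⟩
  · rintro ⟨i, _, hi⟩
    exact (PySem.Chars.exists_prefix_drop_iff_isIn kw s).mp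
      ⟨i, (PySem.Chars.startswith_iff _ _).mp hi⟩

-- membership of a group index in the scan's collected list ↔ some keyword of pvKeywords
-- with that group occurs as a substring
theorem mem_flat_gs_iff (s : List Char) (k : Nat) :
    (k ∈ (List.range s.length).flatMap (fun i => pvGs (s.drop i)))
      ↔ ∃ p ∈ pvKeywords, p.2 = k ∧ PySem.Chars.isIn p.1 s = true := by
  simp only [List.mem_flatMap, pvGs, List.mem_map, List.mem_filter]
  constructor
  · rintro ⟨i, hi, p, ⟨hmem, hsw⟩, hk⟩
    exact ⟨p, hmem, hk,
      (isIn_iff_exists_startswith p.1 s (pvKeywords_fst_ne_nil p hmem)).mpr ⟨i, hi, hsw⟩⟩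
  · rintro ⟨p, hmem, hk, hin⟩
    obtain ⟨i, hi, hsw⟩ :=
      (isIn_iff_exists_startswith p.1 s (pvKeywords_fst_ne_nil p hmem)).mp hin
    exact ⟨i, hi, p, ⟨hmem, hsw⟩, hk⟩

-- ===== VERDICT (by name: the statement is the Claim_ definition above) =====
theorem intent_to_methods_spec : Claim_equal_intent_to_methods := by
  intro user_text _
  show intent_to_methods user_text = intent_to_methods_alt user_text
  unfold intent_to_methods intent_to_methods_alt
  dsimp only
  set t := PySem.Str.lower user_text with ht
  set s := t.toList with hs
  have hfun : (fun (b : Nat) (i : Nat) => pvInner (s.drop i) b pvKeywords)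
      = fun b i => (pvGs (s.drop i)).foldl min b := by
    funext b i
    exact pvInner_eq_foldl (s.drop i) pvKeywords b
  rw [hfun, foldl_min_flatMap (fun i => pvGs (s.drop i)) (List.range s.length) 4]
  set G := (List.range s.length).flatMap (fun i => pvGs (s.drop i)) with hG
  set r := G.foldl min 4 with hr
  have hmem : r ∈ 4 :: G := foldl_min_mem G 4
  have hle : ∀ g ∈ G, r ≤ g := fun g hg => foldl_min_le_mem G g hg 4
  have hG4 : ∀ g ∈ G, g < 4 := by
    intro g hg
    obtain ⟨p, hp, hpk, -⟩ := (mem_flat_gs_iff s g).mp hg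
    exact hpk ▸ pvKeywords_snd_lt p hp
  have e0 : ((["create", "add", "open", "log", "new", "raise"] : List String).any
        (fun k => PySem.Str.isIn k t) = true) ↔ (0 : Nat) ∈ G := by
    rw [mem_flat_gs_iff s 0]
    simp [pvKeywords, hs]
  have e1 : ((["update", "edit", "change", "modify", "move", "set"] : List String).any
        (fun k => PySem.Str.isIn k t) = true) ↔ (1 : Nat) ∈ G := by
    rw [mem_flat_gs_iff s 1]
    simp [pvKeywords, hs]
  have e2 : ((["delete", "remove", "drop"] : List String).any
        (fun k => PySem.Str.isIn k t) = true) ↔ (2 : Nat) ∈ G := by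
    rw [mem_flat_gs_iff s 2]
    simp [pvKeywords, hs]
  have e3 : ((["get", "fetch", "read", "list", "show", "find", "search", "view"] : List String).any
        (fun k => PySem.Str.isIn k t) = true) ↔ (3 : Nat) ∈ G := by
    rw [mem_flat_gs_iff s 3]
    simp [pvKeywords, hs]
  by_cases h0 : (["create", "add", "open", "log", "new", "raise"] : List String).any
      (fun k => PySem.Str.isIn k t) = true
  · have hr0 : r = 0 := Nat.le_zero.mp (hle 0 (e0.mp h0))
    rw [if_pos h0, hr0]; rfl
  · by_cases h1 : (["update", "edit", "change", "modify", "move", "set"] : List String).any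
        (fun k => PySem.Str.isIn k t) = true
    · have hm1 : r ≤ 1 := hle 1 (e1.mp h1)
      have hnot0 : (0 : Nat) ∉ G := fun hc => h0 (e0.mpr hc)
      have hr1 : r = 1 := by
        rcases List.mem_cons.mp hmem with h | h
        · omega
        · have := hG4 r h
          interval_cases r
          · exact absurd h hnot0
          · rfl
      rw [if_neg h0, if_pos h1, hr1]; rfl
    · by_cases h2 : (["delete", "remove", "drop"] : List String).any
          (fun k => PySem.Str.isIn k t) = true
      · have hm2 : r ≤ 2 := hle 2 (e2.mp h2)
        have hnot0 : (0 : Nat) ∉ G := fun hc => h0 (e0.mpr hc)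
        have hnot1 : (1 : Nat) ∉ G := fun hc => h1 (e1.mpr hc)
        have hr2 : r = 2 := by
          rcases List.mem_cons.mp hmem with h | h
          · omega
          · have := hG4 r h
            interval_cases r
            · exact absurd h hnot0
            · exact absurd h hnot1
            · rfl
        rw [if_neg h0, if_neg h1, if_pos h2, hr2]; rfl
      · by_cases h3 : (["get", "fetch", "read", "list", "show", "find", "search", "view"] : List String).any
            (fun k => PySem.Str.isIn k t) = true
        · have hm3 : r ≤ 3 := hle 3 (e3.mp h3)
          have hnot0 : (0 : Nat) ∉ G := fun hc => h0 (e0.mpr hc)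
          have hnot1 : (1 : Nat) ∉ G := fun hc => h1 (e1.mpr hc)
          have hnot2 : (2 : Nat) ∉ G := fun hc => h2 (e2.mpr hc)
          have hr3 : r = 3 := by
            rcases List.mem_cons.mp hmem with h | h
            · omega
            · have := hG4 r h
              interval_cases r
              · exact absurd h hnot0
              · exact absurd h hnot1
              · exact absurd h hnot2
              · rfl
          rw [if_neg h0, if_neg h1, if_neg h2, if_pos h3, hr3]; rfl
        · have hr4 : r = 4 := by
            rcases List.mem_cons.mp hmem with h | h
            · exact h
            · have := hG4 r h
              interval_cases r
              · exact absurd h (fun hc => h0 (e0.mpr hc))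
              · exact absurd h (fun hc => h1 (e1.mpr hc))
              · exact absurd h (fun hc => h2 (e2.mpr hc))
              · exact absurd h (fun hc => h3 (e3.mpr hc))
          rw [if_neg h0, if_neg h1, if_neg h2, if_neg h3, hr4]; rfl
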